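-- pv_equiv track=rewrite | github.com/Nameyc99/phantom_mask | core/management/commands/load_initial_data.py | expand_days
-- ===== SOURCE A (Python) =====
-- def expand_days(days_str):
--     DAY_ORDER = ['Mon', 'Tue', 'Wed', 'Thu', 'Fri', 'Sat', 'Sun']
--     if '-' in days_str:
--         start_day, end_day = [d.strip() for d in days_str.split('-')]
--         start_index = DAY_ORDER.index(start_day)
--         end_index = DAY_ORDER.index(end_day)
--         if start_index <= end_index:
--             return DAY_ORDER[start_index:end_index + 1]
--         else:
--             return DAY_ORDER[start_index:] + DAY_ORDER[:end_index + 1]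
--     else:
--         return [d.strip() for d in days_str.split(',')]
-- ===== SOURCE B (Python) =====
-- def expand_days(days_str):
--     DAY_ORDER = ['Mon', 'Tue', 'Wed', 'Thu', 'Fri', 'Sat', 'Sun']
--     if '-' in days_str:
--         start_day, end_day = [d.strip() for d in days_str.split('-')]
--         i = DAY_ORDER.index(start_day)
--         end_index = DAY_ORDER.index(end_day)
--         result = []
--         while True:
--             result.append(DAY_ORDER[i])
--             if i == end_index:
--                 return result
--             i = (i + 1) % 7
--     else:
--         return [d.strip() for d in days_str.split(',')]
-- ===== Notes on version B (the rewrite author's own statement) =====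
-- stated objective: alternative
-- what changed: The range branch's two-case slicing (forward slice vs wraparound slice concatenation) is replaced by a single modular while-loop that walks indices (i+1)%7 from start to end, so the start<=end comparison disappears.
-- outside the precondition, e.g. on expand_days('-'): A raises ValueError, B raises ValueError; on expand_days('Mon-Xyz'): A raises ValueError, B raises ValueError; on expand_days('Mon-Tue-Wed'): A raises ValueError, B raises ValueError
import Mathlib
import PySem

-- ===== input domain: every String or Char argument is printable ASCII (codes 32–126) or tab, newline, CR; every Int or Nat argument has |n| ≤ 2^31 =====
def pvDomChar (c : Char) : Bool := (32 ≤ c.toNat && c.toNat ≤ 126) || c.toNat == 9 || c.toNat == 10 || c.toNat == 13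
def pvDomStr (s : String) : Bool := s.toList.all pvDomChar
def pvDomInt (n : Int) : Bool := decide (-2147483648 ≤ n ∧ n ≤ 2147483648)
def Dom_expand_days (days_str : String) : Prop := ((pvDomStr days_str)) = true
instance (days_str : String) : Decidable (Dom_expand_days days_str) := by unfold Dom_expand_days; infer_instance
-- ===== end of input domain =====

-- B replaces the two-case slice of the range branch by one modular index loop; same values everywhere A returns.

-- ===== PORT A =====
def expand_days (days_str : String) : List String :=
  let DAY_ORDER : List String := ["Mon", "Tue", "Wed", "Thu", "Fri", "Sat", "Sun"]
  if PySem.Str.isIn "-" days_str then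
    -- start_day, end_day = [d.strip() for d in days_str.split('-')]
    match ((PySem.Str.split? days_str "-").getD [] |>.map PySem.Str.strip) with
    | [start_day, end_day] =>
      match PySem.List.index? DAY_ORDER start_day, PySem.List.index? DAY_ORDER end_day with
      | some start_index, some end_index =>
        if start_index ≤ end_index then
          PySem.List.slice DAY_ORDER (some (start_index : Int)) (some ((end_index : Int) + 1))
        else
          PySem.List.slice DAY_ORDER (some (start_index : Int)) none ++
            PySem.List.slice DAY_ORDER none (some ((end_index : Int) + 1))
      | _, _ => []   -- ValueError from .index: excluded by Pre_
    | _ => []        -- unpacking ValueError: excluded by Pre_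
  else
    (PySem.Str.split? days_str ",").getD [] |>.map PySem.Str.strip

-- ===== PORT B =====
-- the while-True loop of B: append DAY_ORDER[i], stop at end_index, else i = (i+1) % 7.
-- fuel 7 only makes the recursion total; with i, end_index < 7 the loop stops before fuel runs out.
def walkDays (i end_index : Nat) : Nat → List String
  | 0 => []
  | fuel + 1 =>
    (["Mon", "Tue", "Wed", "Thu", "Fri", "Sat", "Sun"] : List String).getD i "" ::
      (if i = end_index then [] else walkDays ((i + 1) % 7) end_index fuel)

def expand_days_alt (days_str : String) : List String :=
  let DAY_ORDER : List String := ["Mon", "Tue", "Wed", "Thu", "Fri", "Sat", "Sun"]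
  if PySem.Str.isIn "-" days_str then
    let parts := (PySem.Str.split? days_str "-").getD [] |>.map PySem.Str.strip
    -- start_day, end_day = parts  (unpack; ≠ 2 parts raises, excluded by Pre_)
    if parts.length = 2 then
      let oi := PySem.List.index? DAY_ORDER (parts.getD 0 "")
      let oe := PySem.List.index? DAY_ORDER (parts.getD 1 "")
      -- .index raising ValueError is excluded by Pre_
      if oi.isSome && oe.isSome then walkDays (oi.getD 0) (oe.getD 0) 7 else []
    else []
  else
    (PySem.Str.split? days_str ",").getD [] |>.map PySem.Str.strip

-- ===== PRECONDITION & SPEC =====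
-- Pre_ excludes exactly the inputs where A raises ValueError: a '-' string whose split
-- does not give exactly two parts, or whose stripped parts are not day names.
def Pre_expand_days (days_str : String) : Prop :=
  PySem.Str.isIn "-" days_str = true →
    ((PySem.Str.split? days_str "-").getD [] |>.map PySem.Str.strip).length = 2 ∧
      ∀ d ∈ ((PySem.Str.split? days_str "-").getD [] |>.map PySem.Str.strip),
        d ∈ (["Mon", "Tue", "Wed", "Thu", "Fri", "Sat", "Sun"] : List String)
instance (days_str : String) : Decidable (Pre_expand_days days_str) := by
  unfold Pre_expand_days; infer_instance

def pvWitness_expand_days : String := "Fri-Tue"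

def Spec_expand_days (days_str : String) (out : List String) : Prop := out = expand_days_alt days_str
instance (days_str : String) (out : List String) : Decidable (Spec_expand_days days_str out) := by unfold Spec_expand_days; infer_instance

-- ===== CLAIM (what is proved, stated in full; the proofs are below) =====
def Claim_equal_expand_days : Prop := ∀ (days_str : String), Dom_expand_days days_str → Pre_expand_days days_str → Spec_expand_days days_str (expand_days days_str)

-- ===== LEMMAS AND PROOFS =====

-- the two-case slice and the modular walk agree on every pair of day indices (49 cases)
theorem slice_eq_walk : ∀ si : Nat, si < 7 → ∀ ei : Nat, ei < 7 →
    (if si ≤ ei then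
        PySem.List.slice ["Mon", "Tue", "Wed", "Thu", "Fri", "Sat", "Sun"]
          (some (si : Int)) (some ((ei : Int) + 1))
      else
        PySem.List.slice ["Mon", "Tue", "Wed", "Thu", "Fri", "Sat", "Sun"]
            (some (si : Int)) none ++
          PySem.List.slice ["Mon", "Tue", "Wed", "Thu", "Fri", "Sat", "Sun"]
            none (some ((ei : Int) + 1)))
      = walkDays si ei 7 := by decide

-- ===== VERDICT (by name: the statement is the Claim_ definition above) =====
theorem expand_days_spec : Claim_equal_expand_days := by
  intro s _ hpre
  unfold Spec_expand_days expand_days expand_days_alt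
  by_cases hdash : PySem.Str.isIn "-" s = true
  · obtain ⟨hlen, hmem⟩ := hpre hdash
    obtain ⟨a, b, hparts⟩ := List.length_eq_two.mp hlen
    have ha := hmem a (by rw [hparts]; simp)
    have hb := hmem b (by rw [hparts]; simp)
    obtain ⟨si, hsi⟩ := Option.isSome_iff_exists.mp
      ((PySem.List.index?_isSome_iff _ a).mpr ha)
    obtain ⟨ei, hei⟩ := Option.isSome_iff_exists.mp
      ((PySem.List.index?_isSome_iff _ b).mpr hb)
    obtain ⟨hsi7, -, -⟩ := PySem.List.getElem_of_index?_eq_some hsi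
    obtain ⟨hei7, -, -⟩ := PySem.List.getElem_of_index?_eq_some hei
    simp only [hdash, if_true, hparts, List.getD, List.getElem?_cons_zero,
      List.getElem?_cons_succ, Option.getD_some, hsi, hei, Option.isSome_some,
      Bool.and_self, List.length_cons, List.length_nil]
    exact slice_eq_walk si hsi7 ei hei7
  · rw [if_neg hdash, if_neg hdash]
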